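-- pv_equiv track=rewrite | github.com/erwansetyobudi/prodi_maping | prodimap.py | alias_index
-- ===== SOURCE A (Python) =====
-- from typing import Dict, List, Optional, Tuple, Set
--
-- def alias_index(fieldnames_norm: List[str], target: str) -> Optional[int]:
--     """
--     Fungsi ini mencari indeks kolom berdasarkan alias nama yang diberikan (seperti 'biblio_id', 'title', 'topic')
--     dalam daftar nama kolom yang telah dinormalisasi (fieldnames_norm).
--     """
--     HEADER_ALIASES = {
--         "biblio_id": {"biblio_id", "id", "biblio id", "biblioid"},
--         "title": {"title", "judul", "book_title"},
--         "topic": {"topic", "kategori", "subject", "topik"},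
--     }
--
--     wanted = HEADER_ALIASES.get(target, set())
--
--     for i, name in enumerate(fieldnames_norm):
--         if name in wanted:
--             return i
--     return None
-- ===== SOURCE B (Python) =====
-- def alias_index(fieldnames_norm, target):
--     HEADER_ALIASES = {
--         "biblio_id": {"biblio_id", "id", "biblio id", "biblioid"},
--         "title": {"title", "judul", "book_title"},
--         "topic": {"topic", "kategori", "subject", "topik"},
--     }
--     wanted = HEADER_ALIASES.get(target, set())
--     idxs = [fieldnames_norm.index(a) for a in wanted if a in fieldnames_norm]
--     return min(idxs) if idxs else None
-- ===== Notes on version B (the rewrite author's own statement) =====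
-- stated objective: faster
-- what changed: Instead of a Python-level scan of the field list testing each name against the alias set, B iterates only the small alias set, gets each alias's first-occurrence index via the C-level list.index, and returns the minimum of those indices (None if no alias occurs).
import Mathlib
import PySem

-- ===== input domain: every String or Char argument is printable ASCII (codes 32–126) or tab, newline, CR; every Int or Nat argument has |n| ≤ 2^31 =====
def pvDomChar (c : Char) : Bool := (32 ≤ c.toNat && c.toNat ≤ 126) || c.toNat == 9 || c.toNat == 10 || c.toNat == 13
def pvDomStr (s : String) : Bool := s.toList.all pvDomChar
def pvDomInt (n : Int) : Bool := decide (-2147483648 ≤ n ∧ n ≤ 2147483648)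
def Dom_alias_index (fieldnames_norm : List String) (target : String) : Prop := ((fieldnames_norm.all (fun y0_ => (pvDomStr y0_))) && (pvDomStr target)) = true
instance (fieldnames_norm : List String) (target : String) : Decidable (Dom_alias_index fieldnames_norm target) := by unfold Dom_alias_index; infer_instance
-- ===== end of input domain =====

-- B replaces A's per-element scan-and-test loop by per-alias C-level list.index lookups whose minimum is taken (measured constant-factor speedup).


-- shared helper: HEADER_ALIASES.get(target, set()) as the list of distinct aliases
def aliasesOf (target : String) : List String :=
  if target = "biblio_id" then ["biblio_id", "id", "biblio id", "biblioid"]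
  else if target = "title" then ["title", "judul", "book_title"]
  else if target = "topic" then ["topic", "kategori", "subject", "topik"]
  else []

-- ===== PORT A =====
-- the 'for i, name in enumerate(...): if name in wanted: return i' loop
def aliasLoop (wanted : List String) : List (Int × String) → Option Int
  | [] => none
  | (i, name) :: rest => if wanted.contains name then some i else aliasLoop wanted rest

def alias_index (fieldnames_norm : List String) (target : String) : Option Int :=
  let wanted := aliasesOf target
  aliasLoop wanted (PySem.List.enumerate fieldnames_norm 0)

-- ===== PORT B =====
def alias_index_alt (fieldnames_norm : List String) (target : String) : Option Int :=
  let wanted := aliasesOf target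
  let idxs := wanted.filterMap (fun a => (PySem.List.index? fieldnames_norm a).map Int.ofNat)
  PySem.List.min? idxs (fun x => x)

-- ===== PRECONDITION & SPEC =====
def Spec_alias_index (fieldnames_norm : List String) (target : String) (out : Option Int) : Prop := out = alias_index_alt fieldnames_norm target
instance (fieldnames_norm : List String) (target : String) (out : Option Int) : Decidable (Spec_alias_index fieldnames_norm target out) := by unfold Spec_alias_index; infer_instance

-- ===== CLAIM (what is proved, stated in full; the proofs are below) =====
def Claim_equal_alias_index : Prop := ∀ (fieldnames_norm : List String) (target : String), Dom_alias_index fieldnames_norm target → Spec_alias_index fieldnames_norm target (alias_index fieldnames_norm target)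

-- ===== LEMMAS AND PROOFS =====

-- min over a list shifted by a constant
theorem foldl_min_add (c : Int) (t : List Int) (x : Int) :
    (t.map (fun z => c + z)).foldl min (c + x) = c + t.foldl min x := by
  induction t generalizing x with
  | nil => simp
  | cons y ys ih =>
    simp only [List.map_cons, List.foldl_cons]
    rw [min_add_add_left]
    exact ih _

theorem min?_id_map_add (c : Int) (l : List Int) :
    PySem.List.min? (l.map (fun z => c + z)) (fun x => x)
      = (PySem.List.min? l (fun x => x)).map (fun z => c + z) := by
  cases l with
  | nil => simp [PySem.List.min?]
  | cons x t => simp [PySem.List.min?_id_cons, foldl_min_add]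

theorem min?_id_eq_zero (l : List Int) (h0 : (0 : Int) ∈ l) (hnn : ∀ y ∈ l, (0 : Int) ≤ y) :
    PySem.List.min? l (fun x => x) = some 0 := by
  have hne : l ≠ [] := by intro h; subst h; simp at h0
  obtain ⟨m, hm⟩ : ∃ m, PySem.List.min? l (fun x => x) = some m := by
    cases hl : PySem.List.min? l (fun x => x) with
    | none => exact absurd ((PySem.List.min?_eq_none_iff l _).mp hl) hne
    | some m => exact ⟨m, rfl⟩
  have hmem := PySem.List.min?_mem hm
  have hmin := PySem.List.min?_isMin hm 0 h0
  have := hnn m hmem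
  rw [hm]
  congr 1
  omega

-- core correspondence: A's enumerate loop from offset s = (min of alias first indices).map (s + ·)
theorem aliasLoop_eq (w : List String) (fns : List String) (s : Int) :
    aliasLoop w (PySem.List.enumerate fns s)
      = (PySem.List.min? (w.filterMap (fun a => (PySem.List.index? fns a).map Int.ofNat)) (fun x => x)).map
          (fun z => s + z) := by
  induction fns generalizing s with
  | nil =>
    simp [PySem.List.enumerate_nil, aliasLoop, PySem.List.index?_eq_idxOf?, PySem.List.min?]
  | cons x xs ih =>
    rw [PySem.List.enumerate_cons]
    by_cases hx : w.contains x
    · simp only [aliasLoop, hx, if_pos]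
      have hxw : x ∈ w := by simpa using hx
      have h0 : (0 : Int) ∈ w.filterMap (fun a => (PySem.List.index? (x :: xs) a).map Int.ofNat) := by
        refine List.mem_filterMap.mpr ⟨x, hxw, ?_⟩
        rw [PySem.List.index?_cons_self]
        rfl
      have hnn : ∀ y ∈ w.filterMap (fun a => (PySem.List.index? (x :: xs) a).map Int.ofNat), (0 : Int) ≤ y := by
        intro y hy
        obtain ⟨a, _, ha⟩ := List.mem_filterMap.mp hy
        obtain ⟨n, -, hn⟩ := Option.map_eq_some_iff.mp ha
        rw [← hn]
        exact Int.natCast_nonneg n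
      rw [min?_id_eq_zero _ h0 hnn]
      simp
    · simp only [aliasLoop, hx, if_neg, Bool.false_eq_true, not_false_eq_true]
      rw [ih (s + 1)]
      have hcongr : w.filterMap (fun a => (PySem.List.index? (x :: xs) a).map Int.ofNat)
          = (w.filterMap (fun a => (PySem.List.index? xs a).map Int.ofNat)).map (fun z => 1 + z) := by
        rw [List.map_filterMap]
        refine List.filterMap_congr ?_
        intro a ha
        have hne : x ≠ a := by
          intro h; subst h; exact hx (by simpa using ha)
        rw [PySem.List.index?_cons_of_ne _ hne]
        cases PySem.List.index? xs a with
        | none => rfl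
        | some n => simp [Option.map]; omega
      rw [hcongr, min?_id_map_add]
      cases PySem.List.min? (w.filterMap (fun a => (PySem.List.index? xs a).map Int.ofNat)) (fun x => x) with
      | none => rfl
      | some m => simp; omega

-- ===== VERDICT (by name: the statement is the Claim_ definition above) =====
theorem alias_index_spec : Claim_equal_alias_index := by
  intro fns target _
  unfold Spec_alias_index alias_index alias_index_alt
  rw [aliasLoop_eq]
  cases PySem.List.min? ((aliasesOf target).filterMap (fun a => (PySem.List.index? fns a).map Int.ofNat)) (fun x => x) with
  | none => rfl
  | some m => simp
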